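-- pv_equiv track=rewrite | github.com/drizztSun/common_project | PythonLeetcode/leetcodeM/1625_LexicographicallySmallestStringAfterApplyingOperations.py | doit_search
-- ===== SOURCE A (Python) =====
-- def doit_search(s: str, a: int, b: int) -> str:
--
--     from math import gcd
--
--     n, eventimes = len(s), 10
--
--     if b % 2 == 0:
--         eventimes = 1
--
--     target = [ord(c) - ord('0') for c in s]
--     ret = s
--
--     for i in range(eventimes):
--
--         for j in range(10):
--
--             t = target[:]
--
--             for k in range(0, n, 2):
--                 t[k] = (t[k] + a * i) % 10
--
--             for k in range(1, n, 2):
--                 t[k] = (t[k] + a * j) % 10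
--
--             t = [chr(c + ord('0')) for c in t]
--
--             for k in range(0, n // gcd(n, k) + 1, 1):
--                 t = t[-b:] + t[:-b]
--                 ret = min(ret, ''.join(t))
--
--     return ret
-- ===== SOURCE B (Python) =====
-- def doit_search(s: str, a: int, b: int) -> str:
--     from math import gcd
--     n = len(s)
--     if n == 0:
--         return s
--     m = len(s[-b:])          # how many characters one rotation moves to the front (slice semantics)
--     g = gcd(n, m)
--     best = s
--     for i in (range(10) if b % 2 else range(1)):
--         for j in range(10):
--             base = ''.join(chr((ord(c) - ord('0') + a * (j if k % 2 else i)) % 10 + ord('0'))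
--                            for k, c in enumerate(s))
--             doubled = base + base
--             for off in range(0, n, g):
--                 cand = doubled[off:off + n]
--                 if cand < best:
--                     best = cand
--     return best
-- ===== Notes on version B (the rewrite author's own statement) =====
-- stated objective: faster
-- what changed: Per (i,j) pair, A applies n+1 sequential in-place rotations (each rebuilt by list slicing and re-joined) and folds min over them; B builds the digit-shifted base string in one enumerate pass, computes the one-step rotation amount and g = gcd(n, amount), and takes the min over the n/g reachable rotations read directly as slices of base+base.
import Mathlib
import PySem

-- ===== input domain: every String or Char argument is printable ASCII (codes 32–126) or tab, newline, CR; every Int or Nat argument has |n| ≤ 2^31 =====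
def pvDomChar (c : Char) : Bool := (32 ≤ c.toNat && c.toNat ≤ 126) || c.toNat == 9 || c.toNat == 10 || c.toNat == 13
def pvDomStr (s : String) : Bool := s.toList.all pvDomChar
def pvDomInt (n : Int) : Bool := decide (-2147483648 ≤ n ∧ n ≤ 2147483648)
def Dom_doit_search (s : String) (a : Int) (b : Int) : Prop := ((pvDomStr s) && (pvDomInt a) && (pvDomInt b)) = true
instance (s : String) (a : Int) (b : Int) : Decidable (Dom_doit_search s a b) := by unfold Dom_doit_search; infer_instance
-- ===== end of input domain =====

-- B replaces A's per-pair scan of n+1 sequential list rotations (each rebuilt and joined) by direct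
-- slices of a doubled string at the n/gcd(n,rotation) reachable offsets; measurably faster (constant
-- factor, and fewer offsets when the gcd is > 1).

-- ===== PORT A =====
-- for k in range(r0, n, 2): t[k] = (t[k] + add) % 10   — state is (t, k): Python's k survives the loop
def A_pass (add : Int) (r0 : Int) (n : Int) (st : List Int × Int) : List Int × Int :=
  (PySem.List.pyRange r0 n 2).foldl
    (fun (st : List Int × Int) (k : Int) =>
      (PySem.List.pySetD st.1 k (PySem.Int.mod (PySem.List.pyGetD st.1 k 0 + add) 10), k)) st

-- t = t[-b:] + t[:-b]; ret = min(ret, ''.join(t))   — state is (t, ret)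
def A_rotStep (b : Int) (st : List Char × List Char) (_k : Int) : List Char × List Char :=
  let t' := PySem.List.slice st.1 (some (-b)) none ++ PySem.List.slice st.1 none (some (-b))
  (t', if t' < st.2 then t' else st.2)

-- the body of the (i, j) loop
def A_inner (a b n : Int) (target : List Int) (ret : List Char) (i j : Int) : List Char :=
  let st2 := A_pass (a * j) 1 n (A_pass (a * i) 0 n (target, 0))
  let tc : List Char := st2.1.map (fun c => Char.ofNat (c.toNat + 48))
  ((PySem.List.pyRange 0 (PySem.Int.floordiv n (Int.gcd n st2.2 : Int) + 1) 1).foldl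
      (A_rotStep b) (tc, ret)).2

def doit_search (s : String) (a : Int) (b : Int) : String :=
  let cs := s.toList
  let n : Int := PySem.List.len cs
  let eventimes : Int := if PySem.Int.mod b 2 = 0 then 1 else 10
  let target : List Int := cs.map (fun c => (c.toNat : Int) - 48)
  String.ofList ((PySem.List.pyRange 0 eventimes 1).foldl (fun (ret : List Char) (i : Int) =>
    (PySem.List.pyRange 0 10 1).foldl (fun (ret : List Char) (j : Int) =>
      A_inner a b n target ret i j) ret) cs)

-- ===== PORT B =====
-- base string: each digit gets a*i (even positions) or a*j (odd positions), built in one pass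
def B_base (a : Int) (cs : List Char) (i j : Int) : List Char :=
  (PySem.List.enumerate cs 0).map (fun kc =>
    Char.ofNat ((PySem.Int.mod (((kc.2.toNat : Int) - 48) + a * (if PySem.Int.mod kc.1 2 ≠ 0 then j else i)) 10).toNat + 48))

-- the body of the (i, j) loop: min over the reachable rotations, sliced out of base+base
def B_inner (a n g : Int) (cs : List Char) (best : List Char) (i j : Int) : List Char :=
  let base := B_base a cs i j
  let doubled := base ++ base
  (PySem.List.pyRange 0 n g).foldl (fun (best : List Char) (off : Int) =>
    let cand := PySem.List.slice doubled (some off) (some (off + n))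
    if cand < best then cand else best) best

def doit_search_alt (s : String) (a : Int) (b : Int) : String :=
  let cs := s.toList
  let n : Int := PySem.List.len cs
  if cs = [] then s
  else
    let m : Int := PySem.List.len (PySem.List.slice cs (some (-b)) none)
    let g : Int := (Int.gcd n m : Int)
    let iList := if PySem.Int.mod b 2 ≠ 0 then PySem.List.pyRange 0 10 1 else PySem.List.pyRange 0 1 1
    String.ofList (iList.foldl (fun (best : List Char) (i : Int) =>
      (PySem.List.pyRange 0 10 1).foldl (fun (best : List Char) (j : Int) =>
        B_inner a n g cs best i j) best) cs)

-- ===== PRECONDITION & SPEC =====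
-- Pre_ excludes only the empty string, on which A raises UnboundLocalError (the rotation count reads
-- the parity loops' variable k, which was never assigned).
def Pre_doit_search (s : String) (a : Int) (b : Int) : Prop := s ≠ ""
instance (s : String) (a : Int) (b : Int) : Decidable (Pre_doit_search s a b) := by
  unfold Pre_doit_search; infer_instance

def pvWitness_doit_search : String × Int × Int := ("5525", 9, 2)

def Spec_doit_search (s : String) (a : Int) (b : Int) (out : String) : Prop := out = doit_search_alt s a b
instance (s : String) (a : Int) (b : Int) (out : String) : Decidable (Spec_doit_search s a b out) := by
  unfold Spec_doit_search; infer_instance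

-- ===== CLAIM (what is proved, stated in full; the proofs are below) =====
def Claim_equal_doit_search : Prop := ∀ (s : String) (a : Int) (b : Int), Dom_doit_search s a b → Pre_doit_search s a b → Spec_doit_search s a b (doit_search s a b)

-- ===== LEMMAS AND PROOFS =====

-- (filled in below)
-- ===== LEMMAS =====
theorem pv_foldl_last (l : List Int) (k0 : Int) : l.foldl (fun _ x => x) k0 = l.getLastD k0 := by
  induction l generalizing k0 with
  | nil => rfl
  | cons h t ih => cases t <;> simp_all [List.getLastD]

theorem pv_setfold (f : Int → Int) (l : List Int) (hnd : l.Nodup) (hnn : ∀ k ∈ l, 0 ≤ k)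
    (t : List Int) :
    l.foldl (fun acc k => PySem.List.pySetD acc k (f (PySem.List.pyGetD acc k 0))) t
      = t.mapIdx (fun idx v => if (idx : Int) ∈ l then f v else v) := by
  induction l generalizing t with
  | nil =>
    simp only [List.foldl_nil, List.not_mem_nil, ite_false]
    apply List.ext_getElem <;> simp
  | cons k l ih =>
    simp only [List.foldl_cons]
    rw [ih (List.Nodup.of_cons hnd) (fun x hx => hnn x (List.mem_cons_of_mem _ hx))]
    have hk0 : 0 ≤ k := hnn k (List.mem_cons_self ..)
    have hknl : k ∉ l := (List.nodup_cons.mp hnd).1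
    rw [PySem.List.pySetD_of_nonneg _ _ hk0]
    apply List.ext_getElem
    · simp
    · intro idx h1 h2
      simp only [List.getElem_mapIdx, List.getElem_set]
      by_cases he : k.toNat = idx
      · have hik : (idx : Int) = k := by omega
        have hniln : (idx : Int) ∉ l := by rw [hik]; exact hknl
        have hil : idx < t.length := by simpa using h2
        have hg : PySem.List.pyGetD t k 0 = t[idx] := by
          rw [PySem.List.pyGetD_eq_getElem t 0 hk0 (by omega)]
          congr 1
        simp [hik, he, hg, hknl]
      · have hne : ¬((idx : Int) = k) := by omega
        simp [he, List.mem_cons, hne]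

theorem pv_pyRange2_nodup (r0 n : Int) : (PySem.List.pyRange r0 n 2).Nodup := by
  rw [PySem.List.pyRange_of_pos r0 n (by norm_num)]
  exact (List.nodup_range).map (fun x y h => by omega)

theorem pv_A_pass_eq (add r0 n : Int) (hr0 : 0 ≤ r0) (t : List Int) (k0 : Int) :
    A_pass add r0 n (t, k0)
      = (t.mapIdx (fun idx v => if (idx : Int) ∈ PySem.List.pyRange r0 n 2
            then PySem.Int.mod (v + add) 10 else v),
         (PySem.List.pyRange r0 n 2).getLastD k0) := by
  unfold A_pass
  rw [PySem.List.foldl_prod_mk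
    (f := fun acc k => PySem.List.pySetD acc k (PySem.Int.mod (PySem.List.pyGetD acc k 0 + add) 10))
    (g := fun _ k => k)]
  rw [pv_foldl_last, pv_setfold (fun v => PySem.Int.mod (v + add) 10) _ (pv_pyRange2_nodup r0 n)
    (fun k hk => by have := (PySem.List.mem_pyRange_iff_of_pos (by norm_num) k).mp hk; omega)]

theorem pv_enumerate_map {β : Type} (cs : List Char) (F : Int × Char → β) (s : Int) :
    (PySem.List.enumerate cs s).map F = cs.mapIdx (fun k c => F ((s + (k : Int), c))) := by
  apply List.ext_getElem
  · simp
  · intro i h1 h2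
    simp [PySem.List.getElem_enumerate]

theorem pv_base_eq (a i j n : Int) (cs : List Char) (hn : n = (cs.length : Int)) :
    (A_pass (a * j) 1 n (A_pass (a * i) 0 n (cs.map (fun c => (c.toNat : Int) - 48), 0))).1.map
        (fun c => Char.ofNat (c.toNat + 48))
      = B_base a cs i j := by
  rw [pv_A_pass_eq _ _ _ (by norm_num), pv_A_pass_eq _ _ _ (by norm_num)]
  unfold B_base
  rw [pv_enumerate_map]
  apply List.ext_getElem
  · simp
  · intro idx h1 h2
    simp only [List.getElem_map, List.getElem_mapIdx]
    have hidx : idx < cs.length := by simpa using h2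
    have hmem0 : ((idx : Int) ∈ PySem.List.pyRange 0 n 2) ↔ (2 : Int) ∣ (idx : Int) := by
      rw [PySem.List.mem_pyRange_iff_of_pos (by norm_num)]
      constructor
      · rintro ⟨-, -, h⟩; simpa using h
      · intro h; exact ⟨by omega, by omega, by simpa using h⟩
    have hmem1 : ((idx : Int) ∈ PySem.List.pyRange 1 n 2) ↔ ¬ (2 : Int) ∣ (idx : Int) := by
      rw [PySem.List.mem_pyRange_iff_of_pos (by norm_num)]
      constructor
      · rintro ⟨-, -, h⟩; omega
      · intro h; exact ⟨by omega, by omega, by omega⟩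
    have hm2 : (PySem.Int.mod (idx : Int) 2 ≠ 0) ↔ ¬ (2 : Int) ∣ (idx : Int) := by
      rw [ne_eq, PySem.Int.mod_eq_zero_iff_dvd]
    by_cases hd : (2 : Int) ∣ (idx : Int)
    · simp [hmem0, hmem1, hd]
    · simp [hmem0, hmem1, hd]

theorem pv_getLastD_map_range (m : Nat) (f : Nat → Int) (d : Int) :
    ((List.range m).map f).getLastD d = if m = 0 then d else f (m - 1) := by
  cases m with
  | zero => simp
  | succ k => simp [List.range_succ]

theorem pv_kf_gcd (n : Int) (hn : 1 ≤ n) :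
    Int.gcd n ((PySem.List.pyRange 1 n 2).getLastD ((PySem.List.pyRange 0 n 2).getLastD 0)) = 1 := by
  rw [PySem.List.pyRange_of_pos 1 n (by norm_num), PySem.List.pyRange_of_pos 0 n (by norm_num)]
  rw [pv_getLastD_map_range, pv_getLastD_map_range]
  rcases eq_or_lt_of_le hn with h1 | h2
  · simp [← h1]
  · have hcnt1 : (if (1:Int) < n then ((n - 1 + 2 - 1) / 2).toNat else 0) = (n / 2).toNat := by
      rw [if_pos h2]; congr 1; omega
    rw [hcnt1]
    have hq1 : 1 ≤ (n / 2).toNat := by omega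
    rw [if_neg (by omega)]
    have hkf : (1 : Int) + 2 * (((n / 2).toNat : Int) - 1) = 2 * ((n/2).toNat : Int) - 1 := by ring
    have hcast : ((((n / 2).toNat : Nat) - 1 : Nat) : Int) = ((n / 2).toNat : Int) - 1 := by omega
    rw [hcast, hkf]
    set q : Int := ((n/2).toNat : Int) with hqd
    have hco : IsCoprime n (2 * q - 1) := by
      have hcase : 2 * q = n ∨ 2 * q + 1 = n := by omega
      rcases hcase with h | h
      · exact ⟨1, -1, by linarith⟩
      · exact ⟨1 - q, q, by nlinarith⟩
    have := Int.isCoprime_iff_gcd_eq_one.mp hco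
    exact this

theorem pv_min2 (r x : List Char) : (if x < r then x else r) = min r x := by
  rcases lt_or_ge x r with h | h
  · simp [h, min_eq_right (le_of_lt h)]
  · simp [not_lt.mpr h, min_eq_left h]

theorem pv_rot_eq (b : Int) (t : List Char) :
    PySem.List.slice t (some (-b)) none ++ PySem.List.slice t none (some (-b))
      = t.rotate (PySem.List.clampIdx t.length (-b)) := by
  rw [PySem.List.slice_some_none]
  have h2 : PySem.List.slice t none (some (-b)) = t.take (PySem.List.clampIdx t.length (-b)) := by
    simp [PySem.List.slice]
  rw [h2, List.rotate_eq_drop_append_take (PySem.List.clampIdx_le _ _)]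

theorem pv_gcd_sub (N c : Nat) (h : c ≤ N) : Nat.gcd N (N - c) = Nat.gcd N c := by
  apply Nat.dvd_antisymm
  · exact Nat.dvd_gcd (Nat.gcd_dvd_left _ _)
      (by simpa [Nat.sub_sub_self h] using
        Nat.dvd_sub (Nat.gcd_dvd_left N (N - c)) (Nat.gcd_dvd_right N (N - c)))
  · exact Nat.dvd_gcd (Nat.gcd_dvd_left _ _)
      (Nat.dvd_sub (Nat.gcd_dvd_left _ _) (Nat.gcd_dvd_right _ _))

theorem pv_A_rotfold (b : Int) (l : List Int) : ∀ (tc ret : List Char),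
    (l.foldl (A_rotStep b) (tc, ret)).2
      = ((List.range l.length).map
          (fun k => tc.rotate ((k + 1) * PySem.List.clampIdx tc.length (-b)))).foldl min ret := by
  induction l with
  | nil => intro tc ret; simp
  | cons x l ih =>
    intro tc ret
    have hstep : A_rotStep b (tc, ret) x
        = (tc.rotate (PySem.List.clampIdx tc.length (-b)),
           min ret (tc.rotate (PySem.List.clampIdx tc.length (-b)))) := by
      unfold A_rotStep
      simp only [pv_rot_eq b tc, pv_min2]
    rw [List.foldl_cons, hstep, ih]
    rw [List.length_cons, List.range_succ_eq_map]
    simp only [List.map_cons, List.foldl_cons, List.map_map, List.length_rotate]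
    congr 1
    · norm_num
    · apply List.map_congr_left
      intro k _
      simp only [Function.comp_apply, List.rotate_rotate]
      congr 1
      simp only [Nat.succ_eq_add_one]
      ring

theorem pv_foldl_min_mem (l : List (List Char)) : ∀ (r : List Char), l.foldl min r ∈ r :: l := by
  induction l with
  | nil => intro r; simp
  | cons x l ih =>
    intro r
    rcases min_choice r x with h | h <;>
      · have := ih (min r x)
        simp only [List.foldl_cons]
        rw [h] at this ⊢
        simp only [List.mem_cons] at this ⊢
        tauto

theorem pv_foldl_min_le (l : List (List Char)) : ∀ (r x : List Char), x ∈ r :: l → l.foldl min r ≤ x := by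
  induction l with
  | nil => intro r x hx; simp at hx; simp [hx]
  | cons y l ih =>
    intro r x hx
    simp only [List.mem_cons] at hx
    simp only [List.foldl_cons]
    rcases hx with rfl | rfl | hx
    · exact le_trans (ih _ _ (List.mem_cons_self ..)) (min_le_left _ _)
    · exact le_trans (ih _ _ (List.mem_cons_self ..)) (min_le_right _ _)
    · exact ih _ _ (List.mem_cons_of_mem _ hx)

theorem pv_foldl_min_sets (l₁ l₂ : List (List Char)) (r : List Char)
    (h : ∀ x, x ∈ l₁ ↔ x ∈ l₂) : l₁.foldl min r = l₂.foldl min r := by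
  apply le_antisymm
  · rcases List.mem_cons.mp (pv_foldl_min_mem l₂ r) with hm | hm
    · rw [hm]; exact pv_foldl_min_le l₁ r r (List.mem_cons_self ..)
    · exact pv_foldl_min_le l₁ r _ (List.mem_cons_of_mem _ ((h _).mpr hm))
  · rcases List.mem_cons.mp (pv_foldl_min_mem l₁ r) with hm | hm
    · rw [hm]; exact pv_foldl_min_le l₂ r r (List.mem_cons_self ..)
    · exact pv_foldl_min_le l₂ r _ (List.mem_cons_of_mem _ ((h _).mp hm))

theorem pv_slice_doubled (base : List Char) (off : Int) (h0 : 0 ≤ off)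
    (hlt : off < (base.length : Int)) :
    PySem.List.slice (base ++ base) (some off) (some (off + (base.length : Int)))
      = base.rotate off.toNat := by
  rw [PySem.List.slice_toNat _ h0 (by omega)]
  have ho : off.toNat ≤ base.length := by omega
  have htn : (off + (base.length : Int)).toNat - off.toNat = base.length := by omega
  rw [htn, List.drop_append_of_le_length ho, List.take_append]
  have h1 : base.length - (base.drop off.toNat).length = off.toNat := by
    simp [List.length_drop]
    omega
  rw [h1, List.take_of_length_le (by simp [List.length_drop])]
  exact (List.rotate_eq_drop_append_take ho).symm

theorem pv_pyRange_g (N G : Nat) (hG : 0 < G) (hdvd : G ∣ N) :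
    PySem.List.pyRange 0 (N : Int) (G : Int)
      = (List.range (N / G)).map (fun t => ((G * t : Nat) : Int)) := by
  rw [PySem.List.pyRange_of_pos 0 (N : Int) (by exact_mod_cast hG)]
  obtain ⟨q, rfl⟩ := hdvd
  have hcnt : (if (0 : Int) < ((G * q : Nat) : Int) then ((((G * q : Nat) : Int) - 0 + G - 1) / G).toNat else 0)
      = G * q / G := by
    by_cases hq : 0 < G * q
    · rw [if_pos (by exact_mod_cast hq)]
      have he : (((G * q : Nat) : Int) - 0 + G - 1) = ((G : Int) - 1) + G * q := by push_cast; ring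
      rw [he, Int.add_mul_ediv_left _ _ (by exact_mod_cast hG.ne')]
      rw [Int.ediv_eq_zero_of_lt (by omega) (by push_cast; omega)]
      rw [Nat.mul_div_cancel_left q hG]
      omega
    · have hq0 : q = 0 := by
        rcases Nat.mul_eq_zero.mp (by omega : G * q = 0) with h | h
        · omega
        · exact h
      subst hq0
      simp
  rw [hcnt]
  apply List.map_congr_left
  intro t _
  push_cast
  ring

theorem pv_nt_fwd (N c : Nat) (hN : 0 < N) (k : Nat) :
    ∃ t : Nat, t < N / Nat.gcd N c ∧ ((k + 1) * c) % N = Nat.gcd N c * t := by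
  set G := Nat.gcd N c with hG
  have hGpos : 0 < G := Nat.gcd_pos_of_pos_left c hN
  have hGN : G ∣ N := Nat.gcd_dvd_left _ _
  have hdvd : G ∣ ((k + 1) * c) % N := by
    have h1 : G ∣ (k + 1) * c := Dvd.dvd.mul_left (Nat.gcd_dvd_right _ _) _
    exact (Nat.dvd_mod_iff hGN).mpr h1
  obtain ⟨t, ht⟩ := hdvd
  refine ⟨t, ?_, ht⟩
  have hmod : G * t < N := by
    rw [← ht]
    exact Nat.mod_lt _ hN
  obtain ⟨q, hq⟩ := hGN
  rw [hq, Nat.mul_div_cancel_left q hGpos]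
  rw [hq] at hmod
  exact Nat.lt_of_mul_lt_mul_left hmod

theorem pv_nt_bwd (N c : Nat) (hN : 0 < N) (t : Nat) :
    ∃ k : Nat, k < N + 1 ∧ ((k + 1) * c) % N = (Nat.gcd N c * t) % N := by
  set u : Int := Int.gcdA (N : Int) (c : Int) with hu
  set v : Int := Int.gcdB (N : Int) (c : Int) with hv
  have hbez : ((Nat.gcd N c : Nat) : Int) = (N : Int) * u + (c : Int) * v := by
    have := Int.gcd_eq_gcd_ab (N : Int) (c : Int)
    rwa [Int.gcd_natCast_natCast] at this
  set w : Int := (v * (t : Int)) % (N : Int) with hw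
  have hNpos : (0 : Int) < (N : Int) := by exact_mod_cast hN
  have hw0 : 0 ≤ w := Int.emod_nonneg _ (by omega)
  have hwN : w < (N : Int) := Int.emod_lt_of_pos _ hNpos
  set K : Nat := if w = 0 then N else w.toNat with hK
  have hK1 : 1 ≤ K := by
    by_cases h : w = 0 <;> simp [hK, h] <;> omega
  have hKN : K ≤ N := by
    by_cases h : w = 0 <;> simp [hK, h] <;> omega
  refine ⟨K - 1, by omega, ?_⟩
  have hKsub : K - 1 + 1 = K := by omega
  rw [hKsub]
  -- transfer to Int
  have hmain : ((K : Int) * c) % (N : Int) = ((Nat.gcd N c : Int) * t) % (N : Int) := by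
    have h1 : (K : Int) ≡ v * t [ZMOD (N : Int)] := by
      by_cases h : w = 0
      · have : (K : Int) = (N : Int) := by simp [hK, h]
        rw [this]
        show (N : Int) % _ = _
        rw [Int.emod_self]
        rw [hw] at h
        omega
      · have hKw : (K : Int) = w := by
          simp [hK, h, Int.toNat_of_nonneg hw0]
        rw [hKw]
        show w % _ = _
        rw [hw, Int.emod_emod_of_dvd _ dvd_rfl]
    have h2 : (K : Int) * c ≡ v * t * c [ZMOD (N : Int)] := h1.mul_right _
    have h3 : (c : Int) * v ≡ (Nat.gcd N c : Int) [ZMOD (N : Int)] := by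
      apply Int.ModEq.symm
      rw [Int.modEq_iff_dvd]
      exact ⟨-u, by linarith [hbez]⟩
    have h4 : (c : Int) * v * t ≡ (Nat.gcd N c : Int) * t [ZMOD (N : Int)] := h3.mul_right _
    have h5 : v * (t : Int) * c = (c : Int) * v * t := by ring
    exact (h2.trans (h5 ▸ h4))
  have hcast : ∀ x y : Nat, ((x % y : Nat) : Int) = (x : Int) % (y : Int) := fun x y => by push_cast; rfl
  have := hmain
  rw [show ((K : Int) * c) = (((K * c : Nat) : Int)) by push_cast; ring,
      show ((Nat.gcd N c : Int) * t) = ((Nat.gcd N c * t : Nat) : Int) by push_cast; ring,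
      ← hcast, ← hcast] at this
  exact_mod_cast this

theorem pv_rot_sets (tc : List Char) (hN : 0 < tc.length) (c : Nat) (x : List Char) :
    (x ∈ (List.range (tc.length + 1)).map (fun k => tc.rotate ((k + 1) * c)))
      ↔ (x ∈ (List.range (tc.length / Nat.gcd tc.length c)).map
          (fun t => tc.rotate (Nat.gcd tc.length c * t))) := by
  simp only [List.mem_map, List.mem_range]
  constructor
  · rintro ⟨k, -, rfl⟩
    obtain ⟨t, htlt, ht⟩ := pv_nt_fwd tc.length c hN k
    exact ⟨t, htlt, by rw [← ht, List.rotate_mod]⟩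
  · rintro ⟨t, -, rfl⟩
    obtain ⟨k, hklt, hk⟩ := pv_nt_bwd tc.length c hN t
    exact ⟨k, hklt, by rw [← List.rotate_mod, hk, List.rotate_mod]⟩

theorem pv_B_base_len (a : Int) (cs : List Char) (i j : Int) :
    (B_base a cs i j).length = cs.length := by
  unfold B_base
  rw [List.length_map, PySem.List.length_enumerate]

theorem pv_inner_eq (a b : Int) (cs : List Char) (hcs : cs ≠ []) (ret : List Char) (i j : Int) :
    A_inner a b (cs.length : Int) (cs.map (fun ch => (ch.toNat : Int) - 48)) ret i j
      = B_inner a (cs.length : Int)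
          ((Int.gcd ((cs.length : Int)) (PySem.List.len (PySem.List.slice cs (some (-b)) none)) : Nat) : Int)
          cs ret i j := by
  have hN : 0 < cs.length := List.length_pos_iff.mpr hcs
  set N := cs.length with hNdef
  set c0 := PySem.List.clampIdx N (-b) with hc0def
  have hc0 : c0 ≤ N := PySem.List.clampIdx_le _ _
  have hm : PySem.List.len (PySem.List.slice cs (some (-b)) none) = ((N - c0 : Nat) : Int) := by
    rw [PySem.List.slice_some_none, PySem.List.len_eq, List.length_drop]
  have hg : ((Int.gcd ((N : Int)) (PySem.List.len (PySem.List.slice cs (some (-b)) none)) : Nat) : Int)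
      = ((Nat.gcd N c0 : Nat) : Int) := by
    rw [hm, Int.gcd_natCast_natCast, pv_gcd_sub N c0 hc0]
  set G := Nat.gcd N c0 with hGdef
  have hGpos : 0 < G := Nat.gcd_pos_of_pos_left c0 hN
  have hGdvd : G ∣ N := Nat.gcd_dvd_left _ _
  -- A side
  have hsnd : (A_pass (a * j) 1 (N : Int) (A_pass (a * i) 0 (N : Int)
        (cs.map (fun ch => (ch.toNat : Int) - 48), 0))).2
      = (PySem.List.pyRange 1 (N : Int) 2).getLastD ((PySem.List.pyRange 0 (N : Int) 2).getLastD 0) := by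
    rw [pv_A_pass_eq _ _ _ (by norm_num), pv_A_pass_eq _ _ _ (by norm_num)]
  have hbase := pv_base_eq a i j (N : Int) cs rfl
  simp only [A_inner]
  rw [hsnd, hbase, pv_kf_gcd (N : Int) (by omega)]
  have hfd : PySem.Int.floordiv (N : Int) ((1 : Nat) : Int) + 1 = ((N + 1 : Nat) : Int) := by
    rw [Nat.cast_one, PySem.Int.floordiv_eq_ediv_of_pos (by norm_num), Int.ediv_one]
    push_cast
    ring
  rw [hfd, pv_A_rotfold]
  have hlen : (PySem.List.pyRange 0 ((N + 1 : Nat) : Int) 1).length = N + 1 := by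
    rw [PySem.List.length_pyRange_one]
    omega
  rw [hlen, pv_B_base_len]
  rw [hg]
  have hblen : ((N : Int)) = ((B_base a cs i j).length : Int) := by rw [pv_B_base_len]
  have hB : B_inner a (N : Int) ((G : Nat) : Int) cs ret i j
      = List.foldl min ret ((List.range (N / G)).map (fun t => (B_base a cs i j).rotate (G * t))) := by
    simp only [B_inner]
    rw [pv_pyRange_g N G hGpos hGdvd]
    rw [List.foldl_map, List.foldl_map]
    apply PySem.List.foldl_congr_mem
    intro acc t ht
    rw [pv_min2]
    congr 1
    have hlt : G * t < N := (Nat.lt_div_iff_mul_lt' hGdvd t).mp (List.mem_range.mp ht)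
    have := pv_slice_doubled (B_base a cs i j) ((G * t : Nat) : Int) (by positivity)
      (by rw [← hblen]; exact_mod_cast hlt)
    rw [hblen]
    rw [this]
    rw [Int.toNat_natCast]
  rw [hB]
  apply pv_foldl_min_sets
  intro x
  have hiff := pv_rot_sets (B_base a cs i j) (by rw [pv_B_base_len]; exact hN) c0 x
  rw [pv_B_base_len] at hiff
  exact hiff

-- ===== VERDICT =====
theorem doit_search_spec : Claim_equal_doit_search := by
  intro s a b _hdom hpre
  unfold Spec_doit_search
  have hcs : s.toList ≠ [] := fun hh => hpre (String.toList_eq_nil_iff.mp hh)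
  unfold doit_search doit_search_alt
  simp only [PySem.List.len_eq, if_neg hcs]
  congr 1
  have hil : (if PySem.Int.mod b 2 ≠ 0 then PySem.List.pyRange 0 10 1 else PySem.List.pyRange 0 1 1)
      = PySem.List.pyRange 0 (if PySem.Int.mod b 2 = 0 then 1 else 10) 1 := by
    by_cases hb : PySem.Int.mod b 2 = 0
    · rw [if_neg (not_not_intro hb), if_pos hb]
    · rw [if_pos hb, if_neg hb]
  rw [hil]
  apply PySem.List.foldl_congr_mem
  intro ret i _
  apply PySem.List.foldl_congr_mem
  intro ret' j _
  exact pv_inner_eq a b s.toList hcs ret' i j
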